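-- pv_equiv track=rewrite | github.com/ccliu-u/SJTU-2023C | data_process.py | check_disease
-- ===== SOURCE A (Python) =====
-- def check_disease(diseases: list):
--     flag = 0
--     for disease in diseases:
--         if disease == 2:
--             flag = 2
--             break
--         elif disease == 1:
--             flag = 1
--     return flag
-- ===== SOURCE B (Python) =====
-- def check_disease(diseases: list):
--     if 2 in diseases:
--         return 2
--     if 1 in diseases:
--         return 1
--     return 0
-- ===== Notes on version B (the rewrite author's own statement) =====
-- stated objective: idiomatic
-- what changed: Replaces the flag-maintaining loop with early break by two direct membership tests: return 2 if 2 is present, else 1 if 1 is present, else 0.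
import Mathlib
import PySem

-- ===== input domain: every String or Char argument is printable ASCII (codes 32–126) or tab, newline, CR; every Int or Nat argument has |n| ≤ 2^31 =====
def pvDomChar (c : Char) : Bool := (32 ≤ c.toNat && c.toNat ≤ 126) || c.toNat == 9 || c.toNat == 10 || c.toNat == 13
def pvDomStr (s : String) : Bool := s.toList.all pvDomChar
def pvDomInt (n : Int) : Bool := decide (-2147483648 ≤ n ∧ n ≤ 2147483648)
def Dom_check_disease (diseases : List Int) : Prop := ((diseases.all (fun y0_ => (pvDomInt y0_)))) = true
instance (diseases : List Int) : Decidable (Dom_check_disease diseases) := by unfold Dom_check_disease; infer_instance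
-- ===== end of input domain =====

-- B replaces A's flag-accumulating loop (with early break on 2) by two membership tests; idiomatic, same cost.

-- ===== PORT A =====
-- literal port of A's loop: flag accumulator, break on 2
def check_disease_loop (l : List Int) (flag : Int) : Int :=
  match l with
  | [] => flag
  | d :: rest =>
    if d == 2 then 2
    else if d == 1 then check_disease_loop rest 1
    else check_disease_loop rest flag

def check_disease (diseases : List Int) : Int :=
  check_disease_loop diseases 0

-- ===== PORT B =====
def check_disease_alt (diseases : List Int) : Int :=
  if diseases.contains 2 then 2
  else if diseases.contains 1 then 1
  else 0

-- ===== PRECONDITION & SPEC =====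
def Spec_check_disease (diseases : List Int) (out : Int) : Prop := out = check_disease_alt diseases
instance (diseases : List Int) (out : Int) : Decidable (Spec_check_disease diseases out) := by unfold Spec_check_disease; infer_instance

-- ===== CLAIM (what is proved, stated in full; the proofs are below) =====
def Claim_equal_check_disease : Prop := ∀ (diseases : List Int), Dom_check_disease diseases → Spec_check_disease diseases (check_disease diseases)

-- ===== LEMMAS AND PROOFS =====
theorem check_disease_loop_eq (l : List Int) (flag : Int) :
    check_disease_loop l flag =
      if l.contains 2 then 2 else if l.contains 1 then 1 else flag := by
  induction l generalizing flag with
  | nil => simp [check_disease_loop]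
  | cons d rest ih =>
    by_cases h2 : d = 2
    · subst h2; simp [check_disease_loop]
    · by_cases h1 : d = 1
      · subst h1
        simp only [check_disease_loop, List.contains_cons]
        rw [ih]
        simp
      · have b2 : (d == 2) = false := by simp [h2]
        have b1 : (d == 1) = false := by simp [h1]
        have c2 : (2 == d) = false := by simp; omega
        have c1 : (1 == d) = false := by simp; omega
        simp only [check_disease_loop, List.contains_cons, b2, b1, c2, c1,
          Bool.false_or]
        rw [if_neg (by simp), if_neg (by simp), ih]

-- ===== VERDICT (by name: the statement is the Claim_ definition above) =====
theorem check_disease_spec : Claim_equal_check_disease := by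
  intro diseases _
  unfold Spec_check_disease check_disease check_disease_alt
  rw [check_disease_loop_eq]
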